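-- pv_equiv track=rewrite | github.com/biswa-d/vestim_micros | vestim/gateway/src/training_setup_manager_qt_test.py | calculate_learnable_parameters
-- ===== SOURCE A (Python) =====
-- def calculate_learnable_parameters(layers, input_size, hidden_units):
--     """
--     Calculate the number of learnable parameters for an LSTM model.
--
--     :param layers: Number of layers (an integer representing the number of LSTM layers)
--     :param input_size: The size of the input features (e.g., 3 for [SOC, Current, Temp])
--     :param hidden_units: An integer representing the number of hidden units in each layer
--     :return: Total number of learnable parameters
--     """
--
--     # Initialize the number of parameters
--     learnable_params = 0
--
--     # Input-to-hidden weights for the first layer (4 * hidden_units * (input_size + hidden_units))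
--     # We account for 4 gates (input, forget, output, and candidate gates)
--     input_layer_params = 4 * (input_size + hidden_units) * hidden_units
--
--     # Add bias terms for each gate in the first layer
--     input_layer_bias = 4 * hidden_units
--
--     learnable_params += input_layer_params + input_layer_bias
--
--     # For each additional LSTM layer, it's hidden_units -> hidden_units
--     for i in range(1, layers):
--         hidden_layer_params = 4 * (hidden_units + hidden_units) * hidden_units
--         hidden_layer_bias = 4 * hidden_units
--         learnable_params += hidden_layer_params + hidden_layer_bias
--
--     # Output layer (assuming 1 output)
--     output_size = 1
--     output_layer_params = hidden_units * output_size
--     output_layer_bias = output_size  # 1 bias for the output layer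
--     learnable_params += output_layer_params + output_layer_bias
--
--     return learnable_params
-- ===== SOURCE B (Python) =====
-- def calculate_learnable_parameters(layers, input_size, hidden_units):
--     """Closed-form count of LSTM learnable parameters (no loop)."""
--     first = 4 * (input_size + hidden_units) * hidden_units + 4 * hidden_units
--     extra = max(layers - 1, 0) * (8 * hidden_units * hidden_units + 4 * hidden_units)
--     output = hidden_units + 1
--     return first + extra + output
-- ===== Notes on version B (the rewrite author's own statement) =====
-- stated objective: faster
-- what changed: Replaced the per-layer loop (which adds the same constant term each iteration) by a closed-form multiplication by max(layers-1, 0).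
import Mathlib
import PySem

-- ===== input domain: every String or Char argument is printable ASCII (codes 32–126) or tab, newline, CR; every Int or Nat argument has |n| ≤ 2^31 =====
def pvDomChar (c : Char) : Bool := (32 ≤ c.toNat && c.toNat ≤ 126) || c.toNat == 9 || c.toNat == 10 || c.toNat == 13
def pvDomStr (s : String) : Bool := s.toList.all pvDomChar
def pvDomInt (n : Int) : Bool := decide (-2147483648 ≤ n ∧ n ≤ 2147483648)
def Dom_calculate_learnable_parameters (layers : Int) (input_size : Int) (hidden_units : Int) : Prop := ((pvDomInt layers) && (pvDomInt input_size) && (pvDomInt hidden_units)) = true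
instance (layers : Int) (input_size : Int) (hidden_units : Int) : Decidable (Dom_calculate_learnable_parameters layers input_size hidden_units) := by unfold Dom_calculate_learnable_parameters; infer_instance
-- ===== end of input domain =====

-- B replaces A's per-layer loop (which adds a constant term each iteration) by a closed form: faster (O(1) vs O(layers)).

-- ===== PORT A =====
def calculate_learnable_parameters (layers : Int) (input_size : Int) (hidden_units : Int) : Int :=
  -- learnable_params = 0; first-layer weights and biases
  let learnable_params : Int := 0
  let input_layer_params : Int := 4 * (input_size + hidden_units) * hidden_units
  let input_layer_bias : Int := 4 * hidden_units
  let learnable_params := learnable_params + input_layer_params + input_layer_bias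
  -- for i in range(1, layers): add hidden->hidden weights and biases
  let learnable_params :=
    (PySem.List.pyRange 1 layers 1).foldl
      (fun acc _ =>
        let hidden_layer_params : Int := 4 * (hidden_units + hidden_units) * hidden_units
        let hidden_layer_bias : Int := 4 * hidden_units
        acc + hidden_layer_params + hidden_layer_bias)
      learnable_params
  -- output layer
  let output_size : Int := 1
  let output_layer_params : Int := hidden_units * output_size
  let output_layer_bias : Int := output_size
  learnable_params + output_layer_params + output_layer_bias

-- ===== PORT B =====
def calculate_learnable_parameters_alt (layers : Int) (input_size : Int) (hidden_units : Int) : Int :=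
  let first : Int := 4 * (input_size + hidden_units) * hidden_units + 4 * hidden_units
  let extra : Int := max (layers - 1) 0 * (8 * hidden_units * hidden_units + 4 * hidden_units)
  let output : Int := hidden_units + 1
  first + extra + output

-- ===== PRECONDITION & SPEC =====
def Spec_calculate_learnable_parameters (layers : Int) (input_size : Int) (hidden_units : Int) (out : Int) : Prop := out = calculate_learnable_parameters_alt layers input_size hidden_units
instance (layers : Int) (input_size : Int) (hidden_units : Int) (out : Int) : Decidable (Spec_calculate_learnable_parameters layers input_size hidden_units out) := by unfold Spec_calculate_learnable_parameters; infer_instance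

-- ===== CLAIM =====
def Claim_equal_calculate_learnable_parameters : Prop := ∀ (layers : Int) (input_size : Int) (hidden_units : Int), Dom_calculate_learnable_parameters layers input_size hidden_units → Spec_calculate_learnable_parameters layers input_size hidden_units (calculate_learnable_parameters layers input_size hidden_units)

-- ===== LEMMAS AND PROOFS =====
theorem foldl_add_const (l : List Int) (c init : Int) :
    l.foldl (fun acc _ => acc + c) init = init + l.length * c := by
  induction l generalizing init with
  | nil => simp
  | cons x xs ih => simp [List.foldl, ih]; ring

-- ===== VERDICT =====
theorem calculate_learnable_parameters_spec : Claim_equal_calculate_learnable_parameters := by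
  intro layers input_size hidden_units _
  unfold Spec_calculate_learnable_parameters calculate_learnable_parameters calculate_learnable_parameters_alt
  simp only []
  rw [show (fun (acc : Int) (_ : Int) =>
        let hidden_layer_params : Int := 4 * (hidden_units + hidden_units) * hidden_units
        let hidden_layer_bias : Int := 4 * hidden_units
        acc + hidden_layer_params + hidden_layer_bias) =
      (fun acc _ => acc + (4 * (hidden_units + hidden_units) * hidden_units + 4 * hidden_units)) by
        funext a b; simp; ring]
  rw [foldl_add_const, PySem.List.length_pyRange_one]
  have h : ((layers - 1).toNat : Int) = max (layers - 1) 0 := by omega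
  rw [h]; ring
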